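-- pv_equiv track=rewrite | github.com/murilo-salem/ia-python-2.0 | Loops/3.py | PrimosMersenne
-- ===== SOURCE A (Python) =====
-- def EhPrimo(num):
--     if num <= 1:
--         return False
--     elif num <= 3:
--         return True
--     elif num % 2 == 0 or num % 3 == 0:
--         return False
--     i = 5
--     while i * i <= num:
--         if num % i == 0 or num % (i + 2) == 0:
--             return False
--         i += 6
--     return True
--
-- def PrimosMersenne(n):
--     PrimosDeMersenne = []
--     for i in range(2, n):
--         if EhPrimo(i):
--             NumerosDeMersenne = 2 ** i - 1
--             if EhPrimo(NumerosDeMersenne):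
--                 PrimosDeMersenne.append((i, NumerosDeMersenne))
--     return PrimosDeMersenne
-- ===== SOURCE B (Python) =====
-- def PrimosMersenne(n):
--     res = []
--     primes = []  # all primes found so far, in increasing order
--     for i in range(2, n):
--         if all(i % p != 0 for p in primes):
--             primes.append(i)
--             m = (1 << i) - 1
--             if _mersenne_is_prime(m):
--                 res.append((i, m))
--     return res
--
-- def _mersenne_is_prime(m):
--     # m = 2**i - 1 with i >= 2, so m is odd and >= 3
--     d = 3
--     while d * d <= m:
--         if m % d == 0:
--             return False
--         d += 2
--     return True
-- ===== Notes on version B (the rewrite author's own statement) =====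
-- stated objective: alternative
-- what changed: B tests each exponent by trial division against an incrementally accumulated list of the primes already found (instead of A's per-candidate 6k±1 wheel trial division) and tests the Mersenne value with a plain odd-step trial division, carrying the (result, primes) pair through one fold.
import Mathlib
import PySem

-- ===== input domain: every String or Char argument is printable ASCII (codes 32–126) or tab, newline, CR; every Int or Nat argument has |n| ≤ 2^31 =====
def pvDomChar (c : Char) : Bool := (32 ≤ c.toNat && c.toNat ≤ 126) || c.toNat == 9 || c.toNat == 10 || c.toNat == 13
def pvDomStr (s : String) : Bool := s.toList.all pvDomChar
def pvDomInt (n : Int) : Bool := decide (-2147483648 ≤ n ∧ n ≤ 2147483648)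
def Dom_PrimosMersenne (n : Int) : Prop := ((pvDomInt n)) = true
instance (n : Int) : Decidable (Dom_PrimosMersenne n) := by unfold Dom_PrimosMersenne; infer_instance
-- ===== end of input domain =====

-- B replaces A's per-candidate 6k±1 trial division by an incrementally maintained
-- prime list for the exponents and a plain odd-step trial division for the Mersenne
-- values (objective: alternative).

-- ===== PORT A =====
-- while loop of EhPrimo: i = 5, 11, 17, …; '%' is Int.emod, exact for Python '%'
-- here because every divisor used (2, 3, i, i+2 with i ≥ 5) is positive.
def ehLoop (num : Int) (i : Int) (hi : 5 ≤ i) : Bool :=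
  if _h : i * i ≤ num then
    if num % i == 0 || num % (i + 2) == 0 then false
    else ehLoop num (i + 6) (by omega)
  else true
termination_by (num - i).toNat
decreasing_by
  have h1 : i < i * i := by nlinarith
  omega

def EhPrimo (num : Int) : Bool :=
  if num ≤ 1 then false
  else if num ≤ 3 then true
  else if num % 2 == 0 || num % 3 == 0 then false
  else ehLoop num 5 (by norm_num)

-- '2 ** i' is exactly 2 ^ i.toNat because i is drawn from range(2, n), so i ≥ 2
def PrimosMersenne (n : Int) : List (Int × Int) :=
  (PySem.List.pyRange 2 n 1).foldl
    (fun acc i =>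
      if EhPrimo i then
        let m : Int := 2 ^ i.toNat - 1
        if EhPrimo m then acc ++ [(i, m)] else acc
      else acc) []

-- ===== PORT B =====
-- while loop of _mersenne_is_prime: d = 3, 5, 7, …
def mersLoop (m : Int) (d : Int) (hd : 3 ≤ d) : Bool :=
  if _h : d * d ≤ m then
    if m % d == 0 then false
    else mersLoop m (d + 2) (by omega)
  else true
termination_by (m - d).toNat
decreasing_by
  have h1 : d < d * d := by nlinarith
  omega

def mersenneIsPrime (m : Int) : Bool := mersLoop m 3 (by norm_num)

-- loop body of B: state = (res, primes); '(1 << i) - 1' with i ≥ 2 from range(2, n)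
def altStep (st : List (Int × Int) × List Int) (i : Int) : List (Int × Int) × List Int :=
  if st.2.all (fun p => i % p != 0) then
    let m : Int := (1 : Int) <<< i.toNat - 1
    if mersenneIsPrime m then (st.1 ++ [(i, m)], st.2 ++ [i])
    else (st.1, st.2 ++ [i])
  else st

def PrimosMersenne_alt (n : Int) : List (Int × Int) :=
  ((PySem.List.pyRange 2 n 1).foldl altStep ([], [])).1

-- ===== PRECONDITION & SPEC =====
def Spec_PrimosMersenne (n : Int) (out : List (Int × Int)) : Prop := out = PrimosMersenne_alt n
instance (n : Int) (out : List (Int × Int)) : Decidable (Spec_PrimosMersenne n out) := by unfold Spec_PrimosMersenne; infer_instance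

-- ===== CLAIM (what is proved, stated in full; the proofs are below) =====
def Claim_equal_PrimosMersenne : Prop := ∀ (n : Int), Dom_PrimosMersenne n → Spec_PrimosMersenne n (PrimosMersenne n)

-- ===== LEMMAS AND PROOFS =====

-- If num has a divisor q ≡ ±1 (mod 6) with i ≤ q and q*q ≤ num, the 6k±1 loop finds one.
theorem ehLoop_false (num : Int) : ∀ k : Nat, ∀ i : Int, ∀ hi : 5 ≤ i, (num - i).toNat = k →
    i % 6 = 5 →
    (∃ q : Int, i ≤ q ∧ q * q ≤ num ∧ q ∣ num ∧ (q % 6 = 1 ∨ q % 6 = 5)) →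
    ehLoop num i hi = false := by
  intro k
  induction k using Nat.strong_induction_on with
  | _ k IH =>
    rintro i hi hk hmod ⟨q, hiq, hqq, hdvd, hqmod⟩
    have hiq2 : i * i ≤ num := le_trans (by nlinarith) hqq
    rw [ehLoop, dif_pos hiq2]
    by_cases hdiv : (num % i == 0 || num % (i + 2) == 0) = true
    · simp [hdiv]
    · rw [if_neg hdiv]
      simp only [Bool.or_eq_true, beq_iff_eq, not_or] at hdiv
      obtain ⟨h1, h2⟩ := hdiv
      have hq1 : q ≠ i := fun h => h1 ((PySem.Int.emod_eq_zero_iff_dvd num i).mpr (h ▸ hdvd))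
      have hq2 : q ≠ i + 2 := fun h => h2 ((PySem.Int.emod_eq_zero_iff_dvd num (i + 2)).mpr (h ▸ hdvd))
      have hge : i + 6 ≤ q := by omega
      have hlt : i < num := lt_of_lt_of_le (by nlinarith) hiq2
      exact IH (num - (i + 6)).toNat (by omega) (i + 6) (by omega) rfl (by omega)
        ⟨q, hge, hqq, hdvd, hqmod⟩

-- If num has no divisor d with 2 ≤ d < num, the 6k±1 loop reports true.
theorem ehLoop_true (num : Int) (hp : ∀ d : Int, 2 ≤ d → d ∣ num → d = num) :
    ∀ k : Nat, ∀ i : Int, ∀ hi : 5 ≤ i, (num - i).toNat = k → ehLoop num i hi = true := by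
  intro k
  induction k using Nat.strong_induction_on with
  | _ k IH =>
    intro i hi hk
    rw [ehLoop]
    by_cases hc : i * i ≤ num
    · rw [dif_pos hc]
      have h1 : ¬ i ∣ num := fun hd => by have := hp i (by omega) hd; nlinarith
      have h2 : ¬ (i + 2) ∣ num := fun hd => by have := hp (i + 2) (by omega) hd; nlinarith
      have hb : (num % i == 0 || num % (i + 2) == 0) = false := by
        simp only [Bool.or_eq_false_iff, beq_eq_false_iff_ne, ne_eq]
        exact ⟨fun h => h1 ((PySem.Int.emod_eq_zero_iff_dvd _ _).mp h),
               fun h => h2 ((PySem.Int.emod_eq_zero_iff_dvd _ _).mp h)⟩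
      rw [hb]
      simp only [Bool.false_eq_true, if_false]
      have hlt : i < num := lt_of_lt_of_le (by nlinarith) hc
      exact IH (num - (i + 6)).toNat (by omega) (i + 6) (by omega) rfl
    · rw [dif_neg hc]

theorem dvd_iff_toNat_dvd {a b : Int} (ha : 0 ≤ a) (hb : 0 ≤ b) : a ∣ b ↔ a.toNat ∣ b.toNat := by
  rw [← Int.natCast_dvd_natCast, Int.toNat_of_nonneg ha, Int.toNat_of_nonneg hb]

theorem prime_no_proper_div (x : Int) (hx : 2 ≤ x) (hp : Nat.Prime x.toNat) :
    ∀ d : Int, 2 ≤ d → d ∣ x → d = x := by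
  intro d hd hdvd
  have hdle : d ≤ x := Int.le_of_dvd (by omega) hdvd
  have h := (dvd_iff_toNat_dvd (by omega) (by omega)).mp hdvd
  rcases hp.eq_one_or_self_of_dvd _ h with h' | h' <;> omega

theorem composite_witness (x : Int) (hx : 2 ≤ x) (hnp : ¬ Nat.Prime x.toNat) :
    ∃ q : Int, 2 ≤ q ∧ q ∣ x ∧ q * q ≤ x ∧ Nat.Prime q.toNat := by
  have h0 : 0 < x.toNat := by omega
  refine ⟨(x.toNat.minFac : Int), ?_, ?_, ?_, ?_⟩
  · have := (Nat.minFac_prime (n := x.toNat) (by omega)).two_le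
    omega
  · rw [dvd_iff_toNat_dvd (by positivity) (by omega)]
    simpa using Nat.minFac_dvd x.toNat
  · have h := Nat.minFac_sq_le_self h0 hnp
    have hc : ((x.toNat.minFac * x.toNat.minFac : Nat) : Int) ≤ ((x.toNat : Nat) : Int) := by
      exact_mod_cast (by nlinarith [h] : x.toNat.minFac * x.toNat.minFac ≤ x.toNat)
    push_cast at hc
    omega
  · simpa using Nat.minFac_prime (n := x.toNat) (by omega)

theorem EhPrimo_iff (num : Int) : EhPrimo num = true ↔ Nat.Prime num.toNat := by
  unfold EhPrimo
  split_ifs with h1 h2 h3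
  · simp only [false_iff]
    intro hp; have := hp.two_le; omega
  · have h : num.toNat = 2 ∨ num.toNat = 3 := by omega
    rcases h with h | h <;> simp [h, Nat.prime_two, Nat.prime_three]
  · simp only [Bool.or_eq_true, beq_iff_eq] at h3
    simp only [false_iff]
    intro hp
    rcases h3 with h | h
    · have hd : (2:Int) ∣ num := (PySem.Int.emod_eq_zero_iff_dvd _ _).mp h
      have h2d : (2:Nat) ∣ num.toNat := by
        have := (dvd_iff_toNat_dvd (a := 2) (b := num) (by norm_num) (by omega)).mp hd
        simpa using this
      rcases hp.eq_one_or_self_of_dvd 2 h2d with h' | h' <;> omega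
    · have hd : (3:Int) ∣ num := (PySem.Int.emod_eq_zero_iff_dvd _ _).mp h
      have h3d : (3:Nat) ∣ num.toNat := by
        have := (dvd_iff_toNat_dvd (a := 3) (b := num) (by norm_num) (by omega)).mp hd
        simpa using this
      rcases hp.eq_one_or_self_of_dvd 3 h3d with h' | h' <;> omega
  · simp only [Bool.or_eq_true, beq_iff_eq, not_or] at h3
    have hn2 : ¬ (2:Int) ∣ num := fun h => h3.1 ((PySem.Int.emod_eq_zero_iff_dvd _ _).mpr h)
    have hn3 : ¬ (3:Int) ∣ num := fun h => h3.2 ((PySem.Int.emod_eq_zero_iff_dvd _ _).mpr h)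
    constructor
    · intro hloop
      by_contra hnp
      obtain ⟨q, hq2, hqd, hqq, hqp⟩ := composite_witness num (by omega) hnp
      have hq2' : ¬ (2:Int) ∣ q := fun h => hn2 (h.trans hqd)
      have hq3' : ¬ (3:Int) ∣ q := fun h => hn3 (h.trans hqd)
      have : ehLoop num 5 (by norm_num) = false :=
        ehLoop_false num (num - 5).toNat 5 (by norm_num) rfl (by norm_num)
          ⟨q, by omega, hqq, hqd, by omega⟩
      rw [this] at hloop
      exact absurd hloop (by simp)
    · intro hp
      exact ehLoop_true num (prime_no_proper_div num (by omega) hp) (num - 5).toNat 5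
        (by norm_num) rfl

-- If m has an odd divisor q with d ≤ q and q*q ≤ m, the odd-step loop finds one.
theorem mersLoop_false (m : Int) : ∀ k : Nat, ∀ d : Int, ∀ hd : 3 ≤ d, (m - d).toNat = k →
    d % 2 = 1 → (∃ q : Int, d ≤ q ∧ q * q ≤ m ∧ q ∣ m ∧ q % 2 = 1) →
    mersLoop m d hd = false := by
  intro k
  induction k using Nat.strong_induction_on with
  | _ k IH =>
    rintro d hd hk hmod ⟨q, hdq, hqq, hdvd, hqmod⟩
    have hdq2 : d * d ≤ m := le_trans (by nlinarith) hqq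
    rw [mersLoop, dif_pos hdq2]
    by_cases hdiv : (m % d == 0) = true
    · simp [hdiv]
    · rw [if_neg hdiv]
      simp only [beq_iff_eq] at hdiv
      have hq1 : q ≠ d := fun h => hdiv ((PySem.Int.emod_eq_zero_iff_dvd m d).mpr (h ▸ hdvd))
      have hge : d + 2 ≤ q := by omega
      have hlt : d < m := lt_of_lt_of_le (by nlinarith) hdq2
      exact IH (m - (d + 2)).toNat (by omega) (d + 2) (by omega) rfl (by omega)
        ⟨q, hge, hqq, hdvd, hqmod⟩

theorem mersLoop_true (m : Int) (hp : ∀ d : Int, 2 ≤ d → d ∣ m → d = m) :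
    ∀ k : Nat, ∀ d : Int, ∀ hd : 3 ≤ d, (m - d).toNat = k → mersLoop m d hd = true := by
  intro k
  induction k using Nat.strong_induction_on with
  | _ k IH =>
    intro d hd hk
    rw [mersLoop]
    by_cases hc : d * d ≤ m
    · rw [dif_pos hc]
      have h1 : ¬ d ∣ m := fun hdvd => by have := hp d (by omega) hdvd; nlinarith
      have hb : (m % d == 0) = false := by
        simp only [beq_eq_false_iff_ne, ne_eq]
        exact fun h => h1 ((PySem.Int.emod_eq_zero_iff_dvd _ _).mp h)
      rw [hb]
      simp only [Bool.false_eq_true, if_false]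
      have hlt : d < m := lt_of_lt_of_le (by nlinarith) hc
      exact IH (m - (d + 2)).toNat (by omega) (d + 2) (by omega) rfl
    · rw [dif_neg hc]

theorem mersenneIsPrime_iff (m : Int) (hm : 3 ≤ m) (hodd : m % 2 = 1) :
    mersenneIsPrime m = true ↔ Nat.Prime m.toNat := by
  unfold mersenneIsPrime
  have hn2 : ¬ (2:Int) ∣ m := by omega
  constructor
  · intro hloop
    by_contra hnp
    obtain ⟨q, hq2, hqd, hqq, hqp⟩ := composite_witness m (by omega) hnp
    have hq2' : ¬ (2:Int) ∣ q := fun h => hn2 (h.trans hqd)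
    have : mersLoop m 3 (by norm_num) = false :=
      mersLoop_false m (m - 3).toNat 3 (by norm_num) rfl (by norm_num)
        ⟨q, by omega, hqq, hqd, by omega⟩
    rw [this] at hloop
    exact absurd hloop (by simp)
  · intro hp
    exact mersLoop_true m (prime_no_proper_div m (by omega) hp) (m - 3).toNat 3 (by norm_num) rfl

-- B's membership test against the accumulated prime list decides primality.
theorem allPrimes_iff (n : Int) (hn : 2 ≤ n) (primes : List Int)
    (hmem : ∀ p : Int, p ∈ primes ↔ 2 ≤ p ∧ p < n ∧ Nat.Prime p.toNat) :
    (primes.all (fun p => n % p != 0) = true) ↔ Nat.Prime n.toNat := by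
  rw [List.all_eq_true]
  constructor
  · intro h
    by_contra hnp
    obtain ⟨q, hq2, hqd, hqq, hqp⟩ := composite_witness n hn hnp
    have hqlt : q < n := lt_of_lt_of_le (by nlinarith) hqq
    have := h q ((hmem q).mpr ⟨hq2, hqlt, hqp⟩)
    simp only [bne_iff_ne, ne_eq] at this
    exact this ((PySem.Int.emod_eq_zero_iff_dvd _ _).mpr hqd)
  · intro hp p hpmem
    obtain ⟨hp2, hplt, _⟩ := (hmem p).mp hpmem
    simp only [bne_iff_ne, ne_eq]
    intro h
    have := prime_no_proper_div n hn hp p hp2 ((PySem.Int.emod_eq_zero_iff_dvd _ _).mp h)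
    omega

-- joint fold invariant: results agree and B's prime list is exactly the primes below n
theorem fold_invariant (n : Int) :
    ((PySem.List.pyRange 2 n 1).foldl
        (fun acc i =>
          if EhPrimo i then
            let m : Int := 2 ^ i.toNat - 1
            if EhPrimo m then acc ++ [(i, m)] else acc
          else acc) []) = ((PySem.List.pyRange 2 n 1).foldl altStep ([], [])).1 ∧
    (∀ p : Int, p ∈ ((PySem.List.pyRange 2 n 1).foldl altStep ([], [])).2 ↔
        2 ≤ p ∧ p < n ∧ Nat.Prime p.toNat) := by
  by_cases hn : n ≤ 2
  · rw [PySem.List.pyRange_one_eq_nil hn]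
    refine ⟨rfl, ?_⟩
    intro p
    simp only [List.foldl_nil, List.not_mem_nil, false_iff, not_and]
    intro h1 h2
    omega
  · have hn2 : 2 ≤ n := by omega
    clear hn
    induction n, hn2 using Int.le_induction with
    | base =>
      rw [PySem.List.pyRange_one_eq_nil (by norm_num)]
      refine ⟨rfl, ?_⟩
      intro p
      simp only [List.foldl_nil, List.not_mem_nil, false_iff, not_and]
      intro h1 h2
      omega
    | succ n hn IH =>
      obtain ⟨hres, hprimes⟩ := IH
      rw [PySem.List.pyRange_one_succ_right hn]
      simp only [List.foldl_append, List.foldl_cons, List.foldl_nil]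
      set SB := List.foldl altStep ([], []) (PySem.List.pyRange 2 n 1) with hSB
      have htest : ((PySem.List.pyRange 2 n 1).foldl altStep ([], [])).2.all
          (fun p => n % p != 0) = EhPrimo n := by
        rw [Bool.eq_iff_iff, allPrimes_iff n hn _ hprimes, EhPrimo_iff]
      have hmshift : (1 : Int) <<< n.toNat - 1 = 2 ^ n.toNat - 1 := by
        rw [Int.shiftLeft_eq]; ring
      have hm3 : (3:Int) ≤ 2 ^ n.toNat - 1 := by
        have h4 : (4:Int) ≤ 2 ^ n.toNat := by
          calc (4:Int) = 2 ^ 2 := by norm_num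
          _ ≤ 2 ^ n.toNat := pow_le_pow_right₀ (by norm_num) (by omega)
        omega
      have hmodd : ((2:Int) ^ n.toNat - 1) % 2 = 1 := by
        have : (2:Int) ∣ 2 ^ n.toNat := dvd_pow_self 2 (by omega)
        omega
      have hmers : EhPrimo (2 ^ n.toNat - 1) = mersenneIsPrime (2 ^ n.toNat - 1) := by
        rw [Bool.eq_iff_iff, EhPrimo_iff, mersenneIsPrime_iff _ hm3 hmodd]
      simp only [altStep]
      rw [htest, hmshift, hmers]
      by_cases hpn : EhPrimo n = true
      · have hpn' : Nat.Prime n.toNat := (EhPrimo_iff n).mp hpn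
        rw [hpn]
        simp only [if_true]
        by_cases hmp : mersenneIsPrime (2 ^ n.toNat - 1) = true
        · rw [hmp]
          simp only [if_true]
          refine ⟨by rw [hres], ?_⟩
          intro p
          simp only [List.mem_append, List.mem_singleton, hprimes p]
          constructor
          · rintro (⟨a, b, c⟩ | rfl)
            · exact ⟨a, by omega, c⟩
            · exact ⟨by have := hpn'.two_le; omega, by omega, hpn'⟩
          · rintro ⟨a, b, c⟩
            by_cases hpe : p = n
            · right; exact hpe
            · left; exact ⟨a, by omega, c⟩
        · rw [Bool.not_eq_true] at hmp
          rw [hmp]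
          simp only [Bool.false_eq_true, if_false]
          refine ⟨hres, ?_⟩
          intro p
          simp only [List.mem_append, List.mem_singleton, hprimes p]
          constructor
          · rintro (⟨a, b, c⟩ | rfl)
            · exact ⟨a, by omega, c⟩
            · exact ⟨by have := hpn'.two_le; omega, by omega, hpn'⟩
          · rintro ⟨a, b, c⟩
            by_cases hpe : p = n
            · right; exact hpe
            · left; exact ⟨a, by omega, c⟩
      · have hpn' : ¬ Nat.Prime n.toNat := fun h => hpn ((EhPrimo_iff n).mpr h)
        rw [Bool.not_eq_true] at hpn
        rw [hpn]
        simp only [Bool.false_eq_true, if_false]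
        refine ⟨hres, ?_⟩
        intro p
        rw [hprimes p]
        constructor
        · rintro ⟨a, b, c⟩
          exact ⟨a, by omega, c⟩
        · rintro ⟨a, b, c⟩
          refine ⟨a, ?_, c⟩
          by_cases hpe : p = n
          · subst hpe; exact absurd c hpn'
          · omega

-- ===== VERDICT (by name: the statement is the Claim_ definition above) =====
theorem PrimosMersenne_spec : Claim_equal_PrimosMersenne := by
  intro n _
  unfold Spec_PrimosMersenne PrimosMersenne PrimosMersenne_alt
  exact (fold_invariant n).1
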